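-- pv_equiv track=rewrite | github.com/lilibet0/word_search | main.py | get_list_of_new_words
-- ===== SOURCE A (Python) =====
-- def binary_search(word, wordList, low_index, high_index):
--     if low_index > high_index:
--         # Word is not in word list
--         return False
--     else:
--         mid_index = (low_index
--                      + high_index) // 2
--
--         if word == wordList[mid_index].lower():
--             return True
--
--         elif word < wordList[mid_index].lower():
--             # Recursively search to the left of the mid point
--             return binary_search(word, wordList, low_index, mid_index - 1)
--
--         else:
--             # Recursively search to the right of the mid point
--             return binary_search(word, wordList, mid_index + 1, high_index)
--
-- def get_list_of_new_words(wordsTuple, wordListTuple):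
--     words = list(wordsTuple)
--     wordList = list(wordListTuple)
--     newWordList = []
--
--     for i in words:
--         if binary_search(i.lower(), wordList, 0, len(wordList) - 1) is False:
--             # Word was not found in wordList
--             newWordList.append(i.lower())
--
--     return (tuple)(newWordList)
-- ===== SOURCE B (Python) =====
-- def binary_search_iter(word, wordList):
--     low, high = 0, len(wordList) - 1
--     while low <= high:
--         mid = (low + high) // 2
--         w = wordList[mid].lower()
--         if word == w:
--             return True
--         low, high = (low, mid - 1) if word < w else (mid + 1, high)
--     return False
--
-- def get_list_of_new_words(wordsTuple, wordListTuple):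
--     wordList = list(wordListTuple)
--     return tuple(i.lower() for i in wordsTuple
--                  if not binary_search_iter(i.lower(), wordList))
-- ===== Notes on version B (the rewrite author's own statement) =====
-- stated objective: idiomatic
-- what changed: The recursive binary_search helper becomes an iterative while-loop over a (low, high) state pair performing the exact same probes, and the outer append loop becomes a filtering generator expression.
import Mathlib
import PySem

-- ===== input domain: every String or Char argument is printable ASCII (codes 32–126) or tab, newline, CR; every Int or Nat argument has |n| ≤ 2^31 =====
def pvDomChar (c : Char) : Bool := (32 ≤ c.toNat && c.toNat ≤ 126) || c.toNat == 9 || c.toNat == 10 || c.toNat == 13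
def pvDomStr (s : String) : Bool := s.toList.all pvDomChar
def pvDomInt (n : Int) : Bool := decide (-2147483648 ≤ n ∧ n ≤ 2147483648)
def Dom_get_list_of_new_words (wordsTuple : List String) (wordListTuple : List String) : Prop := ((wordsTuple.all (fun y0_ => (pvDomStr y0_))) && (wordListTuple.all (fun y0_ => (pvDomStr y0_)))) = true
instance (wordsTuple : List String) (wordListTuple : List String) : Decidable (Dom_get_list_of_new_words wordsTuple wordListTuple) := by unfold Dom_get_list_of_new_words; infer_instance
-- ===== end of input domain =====

-- B replaces the recursive binary_search with an iterative (low, high)-state loop making the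
-- identical probes, and the outer append loop with a filtering comprehension (objective: idiomatic).


-- ===== PORT A =====
-- recursive binary search; the index mid is always in range on the calls A makes,
-- so the '.getD ""' default of pyGet? is never used
def binary_search (word : String) (wordList : List String) (low_index high_index : Int) : Bool :=
  if low_index > high_index then
    false
  else
    let mid_index := PySem.Int.floordiv (low_index + high_index) 2
    let w := PySem.Str.lower ((PySem.List.pyGet? wordList mid_index).getD "")
    if word == w then true
    else if word < w then
      binary_search word wordList low_index (mid_index - 1)
    else
      binary_search word wordList (mid_index + 1) high_index
termination_by (high_index + 1 - low_index).toNat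
decreasing_by
  · have h := PySem.Int.floordiv_two_mid_bounds (lo := low_index) (hi := high_index) (by omega)
    omega
  · have h := PySem.Int.floordiv_two_mid_bounds (lo := low_index) (hi := high_index) (by omega)
    omega

def get_list_of_new_words (wordsTuple : List String) (wordListTuple : List String) : List String :=
  let words := wordsTuple
  let wordList := wordListTuple
  let newWordList : List String := []
  words.foldl
    (fun acc i =>
      if binary_search (PySem.Str.lower i) wordList 0 ((wordList.length : Int) - 1) == false then
        acc ++ [PySem.Str.lower i]
      else acc)
    newWordList

-- ===== PORT B =====
-- iterative binary search: a while-loop over the (low, high) state pair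
def binary_search_iter_loop (word : String) (wordList : List String) (st : Int × Int) : Bool :=
  if _h : st.1 ≤ st.2 then
    let mid := PySem.Int.floordiv (st.1 + st.2) 2
    let w := PySem.Str.lower ((PySem.List.pyGet? wordList mid).getD "")
    if word == w then true
    else
      binary_search_iter_loop word wordList
        (if word < w then (st.1, mid - 1) else (mid + 1, st.2))
  else false
termination_by (st.2 + 1 - st.1).toNat
decreasing_by
  have h := PySem.Int.floordiv_two_mid_bounds (lo := st.1) (hi := st.2) (by omega)
  split <;> simp <;> omega

def binary_search_iter (word : String) (wordList : List String) : Bool :=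
  binary_search_iter_loop word wordList (0, (wordList.length : Int) - 1)

def get_list_of_new_words_alt (wordsTuple : List String) (wordListTuple : List String) : List String :=
  let wordList := wordListTuple
  (wordsTuple.filter (fun i => !binary_search_iter (PySem.Str.lower i) wordList)).map PySem.Str.lower

-- ===== PRECONDITION & SPEC =====
def Spec_get_list_of_new_words (wordsTuple : List String) (wordListTuple : List String) (out : List String) : Prop := out = get_list_of_new_words_alt wordsTuple wordListTuple
instance (wordsTuple : List String) (wordListTuple : List String) (out : List String) : Decidable (Spec_get_list_of_new_words wordsTuple wordListTuple out) := by unfold Spec_get_list_of_new_words; infer_instance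

-- ===== CLAIM (what is proved, stated in full; the proofs are below) =====
def Claim_equal_get_list_of_new_words : Prop := ∀ (wordsTuple : List String) (wordListTuple : List String), Dom_get_list_of_new_words wordsTuple wordListTuple → Spec_get_list_of_new_words wordsTuple wordListTuple (get_list_of_new_words wordsTuple wordListTuple)

-- ===== LEMMAS AND PROOFS =====

-- the two searches agree on every state, by strong induction on the interval width
theorem search_eq (word : String) (wordList : List String) :
    ∀ (n : Nat) (low high : Int), (high + 1 - low).toNat ≤ n →
      binary_search word wordList low high = binary_search_iter_loop word wordList (low, high) := by
  intro n
  induction n with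
  | zero =>
    intro low high hn
    rw [binary_search, binary_search_iter_loop,
        if_pos (show low > high by omega), dif_neg (show ¬ low ≤ high by omega)]
  | succ n ih =>
    intro low high hn
    rw [binary_search, binary_search_iter_loop]
    by_cases hlh : high < low
    · rw [if_pos (show low > high by omega), dif_neg (show ¬ low ≤ high by omega)]
    · have hmid := PySem.Int.floordiv_two_mid_bounds (lo := low) (hi := high) (by omega)
      rw [if_neg (show ¬ low > high by omega), dif_pos (show low ≤ high by omega)]
      dsimp only
      split_ifs with h1 h2
      · rfl
      · exact ih low _ (by omega)
      · exact ih _ high (by omega)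

-- ===== VERDICT (by name: the statement is the Claim_ definition above) =====
theorem get_list_of_new_words_spec : Claim_equal_get_list_of_new_words := by
  intro wordsTuple wordListTuple _
  unfold Spec_get_list_of_new_words get_list_of_new_words get_list_of_new_words_alt
  simp only
  rw [PySem.List.foldl_append_if
    (p := fun i => binary_search (PySem.Str.lower i) wordListTuple 0 ((wordListTuple.length : Int) - 1) == false)
    (f := PySem.Str.lower)]
  simp only [List.nil_append]
  congr 1
  apply List.filter_congr
  intro i _
  rw [search_eq (PySem.Str.lower i) wordListTuple ((wordListTuple.length : Int) + 1 - 0).toNat 0 ((wordListTuple.length : Int) - 1) (by omega)]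
  simp [binary_search_iter]
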